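-- pv_equiv track=rewrite | github.com/aniljoseph-ae/CpG_Predictor_App_Test | app.py | highlight_cg
-- ===== SOURCE A (Python) =====
-- def highlight_cg(seq):
--     highlighted = ""
--     i = 0
--     while i < len(seq):
--         if i + 1 < len(seq) and seq[i:i+2].upper() == "CG":
--             highlighted += f"<span style='color:red; font-weight:bold;'>CG</span>"
--             i += 2
--         else:
--             highlighted += seq[i]
--             i += 1
--     return highlighted
-- ===== SOURCE B (Python) =====
-- def highlight_cg(seq):
--     span = "<span style='color:red; font-weight:bold;'>CG</span>"
--     low = seq.lower()
--     parts = []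
--     start = 0
--     while True:
--         j = low.find("cg", start)
--         if j < 0:
--             parts.append(seq[start:])
--             break
--         parts.append(seq[start:j])
--         parts.append(span)
--         start = j + 2
--     return "".join(parts)
-- ===== Notes on version B (the rewrite author's own statement) =====
-- stated objective: faster
-- what changed: Replaces the per-character while-loop with string concatenation by a find-and-jump scan over a lowercased copy: str.find locates each dinucleotide match at C speed, the untouched chunks and the spans are collected in a list and joined once.
import Mathlib
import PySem

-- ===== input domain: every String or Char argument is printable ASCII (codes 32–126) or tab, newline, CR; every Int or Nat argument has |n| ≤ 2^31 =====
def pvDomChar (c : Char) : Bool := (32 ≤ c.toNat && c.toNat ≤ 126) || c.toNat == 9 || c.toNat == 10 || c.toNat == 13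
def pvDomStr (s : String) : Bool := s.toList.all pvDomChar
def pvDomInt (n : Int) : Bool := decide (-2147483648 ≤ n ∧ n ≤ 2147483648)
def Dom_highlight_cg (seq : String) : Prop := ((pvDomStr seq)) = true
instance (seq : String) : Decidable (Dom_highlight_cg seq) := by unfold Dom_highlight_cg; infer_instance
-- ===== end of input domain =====

-- B replaces A's per-character while-loop (string += per char) by a find-and-jump scan over a
-- lowercased copy, collecting untouched chunks and spans in a list joined once (measurably faster in Python).

def pvSpan : List Char := "<span style='color:red; font-weight:bold;'>CG</span>".toList

-- ===== PORT A =====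
def highlightALoop (s : List Char) (hl : List Char) (i : Nat) : List Char :=
  if i < s.length then
    if decide (i + 1 < s.length) &&
        (PySem.Chars.upper (PySem.Chars.slice s (some (i : Int)) (some ((i : Int) + 2))) == ['C', 'G']) then
      highlightALoop s (hl ++ pvSpan) (i + 2)
    else
      -- seq[i]: pyGet? is some here (i < len); .elim is only the totality guard
      highlightALoop s (hl ++ (PySem.List.pyGet? s (i : Int)).elim [] ([·])) (i + 1)
  else hl
termination_by s.length - i
decreasing_by all_goals omega

def highlight_cg (seq : String) : String := String.ofList (highlightALoop seq.toList [] 0)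

-- ===== PORT B =====
-- termination fact for B's loop: a non-negative find result leaves room for the 2-char match
theorem pvFindFacts (low : List Char) (start : Nat)
    (h : ¬ PySem.Chars.findFrom low ['c', 'g'] (start : Int) < 0) :
    start ≤ (PySem.Chars.findFrom low ['c', 'g'] (start : Int)).toNat ∧
      (PySem.Chars.findFrom low ['c', 'g'] (start : Int)).toNat + 2 ≤ low.length := by
  have hk : start ≤ low.length := by
    by_contra hgt
    have : PySem.Chars.findFrom low ['c', 'g'] (start : Int) = -1 := by
      simp only [PySem.Chars.findFrom]
      split_ifs with h1 h2 <;> first | rfl | omega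
    omega
  have hne : PySem.Chars.findFrom low ['c', 'g'] (start : Int) ≠ -1 := by omega
  obtain ⟨h1, h2, _⟩ := PySem.Chars.findFrom_natCast_spec low ['c', 'g'] start hk hne
  refine ⟨by omega, ?_⟩
  have := h2.length_le
  simp at this
  omega

def highlightBLoop (s low : List Char) (start : Nat) (parts : List (List Char)) : List (List Char) :=
  let j := PySem.Chars.findFrom low ['c', 'g'] (start : Int)
  if j < 0 then parts ++ [PySem.Chars.slice s (some (start : Int)) none]
  else
    highlightBLoop s low (j.toNat + 2)
      (parts ++ [PySem.Chars.slice s (some (start : Int)) (some j), pvSpan])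
termination_by low.length + 1 - start
decreasing_by
  have := pvFindFacts low start (by assumption)
  omega

def highlight_cg_alt (seq : String) : String :=
  let low := PySem.Chars.lower seq.toList
  String.ofList (PySem.Chars.join [] (highlightBLoop seq.toList low 0 []))

-- ===== PRECONDITION & SPEC =====
def Spec_highlight_cg (seq : String) (out : String) : Prop := out = highlight_cg_alt seq
instance (seq : String) (out : String) : Decidable (Spec_highlight_cg seq out) := by unfold Spec_highlight_cg; infer_instance

-- ===== CLAIM (what is proved, stated in full; the proofs are below) =====
def Claim_equal_highlight_cg : Prop := ∀ (seq : String), Dom_highlight_cg seq → Spec_highlight_cg seq (highlight_cg seq)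

-- ===== LEMMAS AND PROOFS =====

-- the common semantics: the output for the suffix of s starting at i
def pvSpec (s : List Char) (i : Nat) : List Char :=
  if _h : i < s.length then
    if i + 1 < s.length ∧ PySem.Chars.upperChar s[i]! = 'C' ∧ PySem.Chars.upperChar s[i + 1]! = 'G' then
      pvSpan ++ pvSpec s (i + 2)
    else s[i]! :: pvSpec s (i + 1)
  else []
termination_by s.length - i
decreasing_by all_goals omega

-- "a CG dinucleotide (any case) starts at i"
def pvMatch (s : List Char) (i : Nat) : Prop :=
  i + 1 < s.length ∧ PySem.Chars.upperChar s[i]! = 'C' ∧ PySem.Chars.upperChar s[i + 1]! = 'G'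

theorem pvLowerChar_c_iff (c : Char) : (PySem.Chars.lowerChar c = 'c') ↔ (c = 'c' ∨ c = 'C') := by
  simp only [PySem.Chars.lowerChar, PySem.Chars.isupper]
  split_ifs with h
  · simp only [Bool.and_eq_true, decide_eq_true_eq] at h
    have hle : c.toNat ≤ 90 := h.2
    constructor
    · intro he
      have ht : (Char.ofNat (c.toNat + 32)).toNat = 'c'.toNat := congrArg Char.toNat he
      rw [Char.toNat_ofNat, if_pos (by constructor; omega)] at ht
      right
      have hv : c.toNat = 67 := by simpa using ht
      have h2 := Char.ofNat_toNat c
      rw [hv] at h2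
      exact h2.symm
    · rintro (rfl | rfl)
      · exact absurd h (by decide)
      · decide
  · simp only [Bool.and_eq_true, decide_eq_true_eq, not_and_or, not_le] at h
    constructor
    · exact Or.inl
    · rintro (rfl | rfl)
      · rfl
      · rcases h with h | h <;> exact absurd h (by decide)
theorem pvLowerChar_g_iff (c : Char) : (PySem.Chars.lowerChar c = 'g') ↔ (c = 'g' ∨ c = 'G') := by
  simp only [PySem.Chars.lowerChar, PySem.Chars.isupper]
  split_ifs with h
  · simp only [Bool.and_eq_true, decide_eq_true_eq] at h
    have hle : c.toNat ≤ 90 := h.2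
    constructor
    · intro he
      have ht : (Char.ofNat (c.toNat + 32)).toNat = 'g'.toNat := congrArg Char.toNat he
      rw [Char.toNat_ofNat, if_pos (by constructor; omega)] at ht
      right
      have hv : c.toNat = 71 := by simpa using ht
      have h2 := Char.ofNat_toNat c
      rw [hv] at h2
      exact h2.symm
    · rintro (rfl | rfl)
      · exact absurd h (by decide)
      · decide
  · simp only [Bool.and_eq_true, decide_eq_true_eq, not_and_or, not_le] at h
    constructor
    · exact Or.inl
    · rintro (rfl | rfl)
      · rfl
      · rcases h with h | h <;> exact absurd h (by decide)
theorem pvUpperChar_C_iff (c : Char) : (PySem.Chars.upperChar c = 'C') ↔ (c = 'c' ∨ c = 'C') := by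
  simp only [PySem.Chars.upperChar, PySem.Chars.islower]
  split_ifs with h
  · simp only [Bool.and_eq_true, decide_eq_true_eq] at h
    have h1 : 97 ≤ c.toNat := h.1
    have h2 : c.toNat ≤ 122 := h.2
    constructor
    · intro he
      have ht : (Char.ofNat (c.toNat - 32)).toNat = 'C'.toNat := congrArg Char.toNat he
      rw [Char.toNat_ofNat, if_pos (by constructor; omega)] at ht
      left
      have hv : c.toNat = 99 := by simp at ht; omega
      have hc := Char.ofNat_toNat c
      rw [hv] at hc
      exact hc.symm
    · rintro (rfl | rfl)
      · decide
      · exact absurd h (by decide)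
  · simp only [Bool.and_eq_true, decide_eq_true_eq, not_and_or, not_le] at h
    constructor
    · intro he; right; exact he
    · rintro (rfl | rfl)
      · rcases h with h | h <;> exact absurd h (by decide)
      · rfl
theorem pvUpperChar_G_iff (c : Char) : (PySem.Chars.upperChar c = 'G') ↔ (c = 'g' ∨ c = 'G') := by
  simp only [PySem.Chars.upperChar, PySem.Chars.islower]
  split_ifs with h
  · simp only [Bool.and_eq_true, decide_eq_true_eq] at h
    have h1 : 97 ≤ c.toNat := h.1
    have h2 : c.toNat ≤ 122 := h.2
    constructor
    · intro he
      have ht : (Char.ofNat (c.toNat - 32)).toNat = 'G'.toNat := congrArg Char.toNat he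
      rw [Char.toNat_ofNat, if_pos (by constructor; omega)] at ht
      left
      have hv : c.toNat = 103 := by simp at ht; omega
      have hc := Char.ofNat_toNat c
      rw [hv] at hc
      exact hc.symm
    · rintro (rfl | rfl)
      · decide
      · exact absurd h (by decide)
  · simp only [Bool.and_eq_true, decide_eq_true_eq, not_and_or, not_le] at h
    constructor
    · intro he; right; exact he
    · rintro (rfl | rfl)
      · rcases h with h | h <;> exact absurd h (by decide)
      · rfl

-- [x, y] is a prefix of l.drop i  ↔  the two characters at i, i+1 are x, y
theorem pvPrefix_pair_iff (l : List Char) (i : Nat) (x y : Char) :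
    [x, y] <+: l.drop i ↔ i + 1 < l.length ∧ l[i]! = x ∧ l[i + 1]! = y := by
  constructor
  · intro h
    obtain ⟨t, ht⟩ := h
    have hlen : i + 2 ≤ l.length := by
      have := congrArg List.length ht
      simp [List.length_drop] at this
      omega
    have h0 : l[i]? = some x := by
      have : (List.drop i l)[0]? = some x := by rw [← ht]; rfl
      rwa [List.getElem?_drop, Nat.add_zero] at this
    have h1 : l[i + 1]? = some y := by
      have : (List.drop i l)[1]? = some y := by rw [← ht]; rfl
      rwa [List.getElem?_drop] at this
    refine ⟨by omega, ?_, ?_⟩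
    · simp [List.getElem!_eq_getElem?_getD, h0]
    · simp [List.getElem!_eq_getElem?_getD, h1]
  · rintro ⟨hlen, hx, hy⟩
    refine ⟨l.drop (i + 2), ?_⟩
    have e1 : l.drop i = l[i] :: l.drop (i + 1) := List.drop_eq_getElem_cons (by omega)
    have e2 : l.drop (i + 1) = l[i + 1] :: l.drop (i + 2) := List.drop_eq_getElem_cons (by omega)
    have gx : l[i] = x := by
      have hb : l[i]! = l[i] := by
        simp [List.getElem!_eq_getElem?_getD, List.getElem?_eq_getElem (show i < l.length by omega)]
      rw [← hb, hx]
    have gy : l[i + 1] = y := by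
      have hb : l[i + 1]! = l[i + 1] := by
        simp [List.getElem!_eq_getElem?_getD, List.getElem?_eq_getElem (show i + 1 < l.length by omega)]
      rw [← hb, hy]
    rw [e1, e2, gx, gy]
    rfl

-- the match condition in low = lower s is pvMatch in s
theorem pvMatch_iff_low (s : List Char) (i : Nat) :
    ['c', 'g'] <+: (PySem.Chars.lower s).drop i ↔ pvMatch s i := by
  rw [pvPrefix_pair_iff]
  unfold pvMatch
  simp only [PySem.Chars.lower, List.length_map]
  constructor
  · rintro ⟨hlen, hc, hg⟩
    have gc : (s.map PySem.Chars.lowerChar)[i]! = PySem.Chars.lowerChar s[i]! := by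
      simp [List.getElem!_eq_getElem?_getD, List.getElem?_map,
        List.getElem?_eq_getElem (show i < s.length by omega)]
    have gg : (s.map PySem.Chars.lowerChar)[i + 1]! = PySem.Chars.lowerChar s[i + 1]! := by
      simp [List.getElem!_eq_getElem?_getD, List.getElem?_map,
        List.getElem?_eq_getElem (show i + 1 < s.length by omega)]
    rw [gc] at hc; rw [gg] at hg
    exact ⟨hlen, (pvUpperChar_C_iff _).2 ((pvLowerChar_c_iff _).1 hc),
      (pvUpperChar_G_iff _).2 ((pvLowerChar_g_iff _).1 hg)⟩
  · rintro ⟨hlen, hc, hg⟩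
    have gc : (s.map PySem.Chars.lowerChar)[i]! = PySem.Chars.lowerChar s[i]! := by
      simp [List.getElem!_eq_getElem?_getD, List.getElem?_map,
        List.getElem?_eq_getElem (show i < s.length by omega)]
    have gg : (s.map PySem.Chars.lowerChar)[i + 1]! = PySem.Chars.lowerChar s[i + 1]! := by
      simp [List.getElem!_eq_getElem?_getD, List.getElem?_map,
        List.getElem?_eq_getElem (show i + 1 < s.length by omega)]
    exact ⟨hlen, by rw [gc]; exact (pvLowerChar_c_iff _).2 ((pvUpperChar_C_iff _).1 hc),
      by rw [gg]; exact (pvLowerChar_g_iff _).2 ((pvUpperChar_G_iff _).1 hg)⟩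

theorem pvGetBang (s : List Char) (i : Nat) (h : i < s.length) : s[i]! = s[i] := by
  simp [List.getElem!_eq_getElem?_getD, List.getElem?_eq_getElem h]

-- A's boolean test is pvMatch (for i < len)
theorem pvCond_iff (s : List Char) (i : Nat) (hi : i < s.length) :
    (decide (i + 1 < s.length) &&
      (PySem.Chars.upper (PySem.Chars.slice s (some (i : Int)) (some ((i : Int) + 2))) == ['C', 'G'])) = true
    ↔ (i + 1 < s.length ∧ PySem.Chars.upperChar s[i]! = 'C' ∧ PySem.Chars.upperChar s[i + 1]! = 'G') := by
  by_cases h1 : i + 1 < s.length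
  · have hc : ((i : Int) + 2) = ((i + 2 : Nat) : Int) := by push_cast; ring
    rw [hc, PySem.Chars.slice_eq_listSlice, PySem.List.slice_natCast]
    have e1 : List.drop i s = s[i] :: List.drop (i + 1) s := List.drop_eq_getElem_cons (by omega)
    have e2 : List.drop (i + 1) s = s[i + 1] :: List.drop (i + 2) s := List.drop_eq_getElem_cons (by omega)
    rw [e1, e2]
    simp only [show i + 2 - i = 2 from by omega, List.take_succ_cons, PySem.Chars.upper,
      List.map_cons, List.map_nil, List.take]
    rw [pvGetBang s i (by omega), pvGetBang s (i + 1) (by omega)]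
    simp [h1]
  · simp [h1]

-- an infix of a suffix is a prefix at some later position
theorem pvInfix_iff (sub l : List Char) (start : Nat) :
    sub <:+: l.drop start ↔ ∃ k, start ≤ k ∧ sub <+: l.drop k := by
  constructor
  · rintro ⟨a, b, hab⟩
    refine ⟨start + a.length, by omega, b, ?_⟩
    have hd : l.drop (start + a.length) = (l.drop start).drop a.length := by
      rw [List.drop_drop]
    rw [hd, ← hab]
    simp
  · rintro ⟨k, hk, hp⟩
    have h1 : sub <:+: l.drop k := hp.isInfix
    have h2 : l.drop k <:+ l.drop start := by
      have hd : l.drop k = (l.drop start).drop (k - start) := by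
        rw [List.drop_drop]; congr 1; omega
      rw [hd]
      exact List.drop_suffix _ _
    exact h1.trans h2.isInfix

-- A's loop computes pvSpec
theorem pvALoop_eq (s : List Char) (i : Nat) (hl : List Char) :
    highlightALoop s hl i = hl ++ pvSpec s i := by
  have key : ∀ n i hl, s.length - i ≤ n → highlightALoop s hl i = hl ++ pvSpec s i := by
    intro n
    induction n with
    | zero =>
      intro i hl hn
      rw [highlightALoop, pvSpec]
      rw [if_neg (by omega), dif_neg (by omega)]
      simp
    | succ n ih =>
      intro i hl hn
      rw [highlightALoop, pvSpec]
      by_cases hi : i < s.length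
      · rw [if_pos hi, dif_pos hi]
        by_cases hc : i + 1 < s.length ∧ PySem.Chars.upperChar s[i]! = 'C' ∧ PySem.Chars.upperChar s[i + 1]! = 'G'
        · rw [if_pos ((pvCond_iff s i hi).2 hc), if_pos hc, ih (i + 2) _ (by omega)]
          simp
        · rw [if_neg (fun h => hc ((pvCond_iff s i hi).1 h)), if_neg hc, ih (i + 1) _ (by omega)]
          have hg : PySem.List.pyGet? s (i : Int) = some s[i] := by
            rw [PySem.List.pyGet?_natCast, List.getElem?_eq_getElem hi]
          rw [hg, pvGetBang s i hi]
          simp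
      · rw [if_neg hi, dif_neg hi]; simp
  exact key (s.length - i) i hl (le_refl _)

-- no match in [start, m): pvSpec copies the chunk verbatim
theorem pvSpec_chunk (s : List Char) (start m : Nat) (h1 : start ≤ m) (h2 : m ≤ s.length)
    (h3 : ∀ k, start ≤ k → k < m → ¬ pvMatch s k) :
    pvSpec s start = (s.drop start).take (m - start) ++ pvSpec s m := by
  have key : ∀ d start, start ≤ m → m - start ≤ d → (∀ k, start ≤ k → k < m → ¬ pvMatch s k) →
      pvSpec s start = (s.drop start).take (m - start) ++ pvSpec s m := by
    intro d
    induction d with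
    | zero =>
      intro start hs hd _
      have : start = m := by omega
      subst this
      simp
    | succ d ih =>
      intro start hs hd hno
      by_cases he : start = m
      · subst he; simp
      · have hlt : start < m := by omega
        have hnm := hno start (le_refl _) hlt
        simp only [pvMatch] at hnm
        rw [pvSpec, dif_pos (by omega), if_neg hnm,
          ih (start + 1) (by omega) (by omega) (fun k hk1 hk2 => hno k (by omega) hk2)]
        have ed : s.drop start = s[start] :: s.drop (start + 1) := List.drop_eq_getElem_cons (by omega)
        rw [ed, pvGetBang s start (by omega)]
        have hm : m - start = (m - (start + 1)) + 1 := by omega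
        rw [hm, List.take_succ_cons]
        simp
  exact key (m - start) start h1 (le_refl _) h3

-- no match at or after start: pvSpec is the raw suffix
theorem pvSpec_tail (s : List Char) (start : Nat) (h1 : start ≤ s.length)
    (h3 : ∀ k, start ≤ k → ¬ pvMatch s k) :
    pvSpec s start = s.drop start := by
  rw [pvSpec_chunk s start s.length h1 (le_refl _) (fun k hk _ => h3 k hk)]
  rw [pvSpec, dif_neg (by omega)]
  simp

theorem pvSpec_match (s : List Char) (i : Nat) (h : pvMatch s i) :
    pvSpec s i = pvSpan ++ pvSpec s (i + 2) := by
  obtain ⟨h1, h2, h3⟩ := h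
  rw [pvSpec, dif_pos (by omega), if_pos ⟨h1, h2, h3⟩]

theorem pvJoinNil (l : List (List Char)) : PySem.Chars.join [] l = l.flatten := by
  simp only [PySem.Chars.join, List.intercalate]
  induction l with
  | nil => rfl
  | cons a t ih =>
    cases t with
    | nil => simp
    | cons b t2 =>
      have hi : List.intersperse ([] : List Char) (a :: b :: t2)
          = a :: [] :: List.intersperse [] (b :: t2) := by simp [List.intersperse]
      rw [hi]
      simp only [List.flatten_cons] at *
      simp [ih]

-- B's loop computes pvSpec (after joining)
theorem pvBLoop_eq (s : List Char) (start : Nat) (parts : List (List Char))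
    (h : start ≤ s.length) :
    (highlightBLoop s (PySem.Chars.lower s) start parts).flatten
      = parts.flatten ++ pvSpec s start := by
  have hlen : (PySem.Chars.lower s).length = s.length := by simp [PySem.Chars.lower]
  have key : ∀ d start parts, start ≤ s.length → s.length - start ≤ d →
      (highlightBLoop s (PySem.Chars.lower s) start parts).flatten
        = parts.flatten ++ pvSpec s start := by
    intro d
    induction d with
    | zero =>
      intro start parts hs hd
      have hse : start = s.length := by omega
      have hneg : PySem.Chars.findFrom (PySem.Chars.lower s) ['c', 'g'] (start : Int) = -1 := by
        rw [PySem.Chars.findFrom_natCast_eq_neg_one_iff (PySem.Chars.lower s) ['c', 'g'] start (by omega)]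
        rw [show (PySem.Chars.lower s).drop start = [] from by
          apply List.drop_eq_nil_of_le; omega]
        intro hinf
        simpa using hinf.length_le
      rw [highlightBLoop]
      simp only [hneg]
      rw [if_pos (by norm_num)]
      rw [PySem.Chars.slice_eq_listSlice, PySem.List.slice_from s (by positivity)]
      rw [pvSpec, dif_neg (by omega)]
      rw [show List.drop (start : Int).toNat s = [] from by
        apply List.drop_eq_nil_of_le; simp; omega]
      simp
    | succ d ih =>
      intro start parts hs hd
      rw [highlightBLoop]
      set j := PySem.Chars.findFrom (PySem.Chars.lower s) ['c', 'g'] (start : Int) with hjdef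
      by_cases hj : j < 0
      · rw [if_pos hj]
        have hnomatch : ∀ k, start ≤ k → ¬ pvMatch s k := by
          intro k hk hm
          have hpre : ['c', 'g'] <+: (PySem.Chars.lower s).drop k := (pvMatch_iff_low s k).2 hm
          have hinf : ['c', 'g'] <:+: (PySem.Chars.lower s).drop start :=
            (pvInfix_iff _ _ _).2 ⟨k, hk, hpre⟩
          have hne : j ≠ -1 := by
            rw [hjdef]
            intro he
            exact ((PySem.Chars.findFrom_natCast_eq_neg_one_iff (PySem.Chars.lower s)
              ['c', 'g'] start (by omega)).1 he) hinf
          have := (PySem.Chars.findFrom_natCast_spec (PySem.Chars.lower s) ['c', 'g'] start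
            (by omega) (by rw [← hjdef] at *; exact hne)).1
          rw [← hjdef] at this
          omega
        rw [pvSpec_tail s start hs hnomatch,
          PySem.Chars.slice_eq_listSlice, PySem.List.slice_from s (by positivity)]
        simp
      · rw [if_neg hj]
        have hne : j ≠ -1 := by omega
        obtain ⟨hge, hpre, hmin⟩ := PySem.Chars.findFrom_natCast_spec (PySem.Chars.lower s)
          ['c', 'g'] start (by omega) (by rw [← hjdef] at *; exact hne)
        rw [← hjdef] at hge hpre hmin
        have hj0 : 0 ≤ j := by omega
        have hjn : (start : Int) ≤ j := hge
        have hstartle : start ≤ j.toNat := by omega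
        have hfit : j.toNat + 2 ≤ s.length := by
          have hl := hpre.length_le
          simp [hlen] at hl
          omega
        rw [ih (j.toNat + 2) _ (by omega) (by omega)]
        have hmatch : pvMatch s j.toNat := (pvMatch_iff_low s j.toNat).1 hpre
        have hchunk : pvSpec s start = (s.drop start).take (j.toNat - start) ++ pvSpec s j.toNat :=
          pvSpec_chunk s start j.toNat hstartle (by omega)
            (fun k hk1 hk2 => fun hm => hmin k hk1 hk2 ((pvMatch_iff_low s k).2 hm))
        have hslice : PySem.Chars.slice s (some (start : Int)) (some j)
            = (s.drop start).take (j.toNat - start) := by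
          rw [show j = ((j.toNat : Nat) : Int) from (Int.toNat_of_nonneg hj0).symm]
          rw [PySem.Chars.slice_eq_listSlice, PySem.List.slice_natCast, Int.toNat_natCast]
        rw [hslice, hchunk, pvSpec_match s j.toNat hmatch]
        simp
  exact key (s.length - start) start parts h (le_refl _)

-- ===== VERDICT (by name: the statement is the Claim_ definition above) =====
theorem highlight_cg_spec : Claim_equal_highlight_cg := by
  intro seq _
  show _ = _
  simp only [highlight_cg, highlight_cg_alt]
  rw [pvALoop_eq, pvJoinNil, pvBLoop_eq seq.toList 0 [] (by omega)]
  simp
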